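-- pv_equiv track=rewrite | github.com/ritsu-NGC/DCM | Steiner_tree.py | new_Gauss_map2
-- ===== SOURCE A (Python) =====
-- import copy
-- import copy
--
-- def new_Gauss_map2(group,tar):
--     list = []
--     inlight = copy.deepcopy(tar)
--     deletate_light = []
--     dl_list = []
--     for index in range(len(group)):
--         if index == len(group) - 1 or group[index][1] < group[index + 1][0]:
--             list.append(group[index])
--             dl_list.reverse()
--             list = list + dl_list
--             deletate_light = []
--             dl_list = []
--         else:
--             deletate_light.append(group[index][1])
--             dl_list.append(group[index])
--             if group[index][1] in inlight:
--                 pass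
--             else:
--                 list.append(group[index])
--
--     return list
-- ===== SOURCE B (Python) =====
-- import copy
--
-- def new_Gauss_map2(group, tar):
--     inlight = copy.deepcopy(tar)
--     # split group into consecutive runs, cutting after i whenever group[i][1] < group[i+1][0]
--     runs = []
--     cur = []
--     for item, nxt in zip(group, group[1:] + [None]):
--         cur.append(item)
--         if nxt is None or item[1] < nxt[0]:
--             runs.append(cur)
--             cur = []
--     # each run contributes: its inner items not lit, then its boundary item, then its inner items reversed
--     out = []
--     for run in runs:
--         inner = run[:-1]
--         out += [x for x in inner if x[1] not in inlight]
--         out.append(run[-1])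
--         out += inner[::-1]
--     return out
-- ===== Notes on version B (the rewrite author's own statement) =====
-- stated objective: alternative
-- what changed: B first partitions the group into explicit consecutive runs (cutting where group[i][1] < group[i+1][0], via a lookahead zip instead of index arithmetic) and then emits each run as filtered-inner + boundary + reversed-inner slices, replacing A's single index loop that interleaves three mutable accumulators.
import Mathlib
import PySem

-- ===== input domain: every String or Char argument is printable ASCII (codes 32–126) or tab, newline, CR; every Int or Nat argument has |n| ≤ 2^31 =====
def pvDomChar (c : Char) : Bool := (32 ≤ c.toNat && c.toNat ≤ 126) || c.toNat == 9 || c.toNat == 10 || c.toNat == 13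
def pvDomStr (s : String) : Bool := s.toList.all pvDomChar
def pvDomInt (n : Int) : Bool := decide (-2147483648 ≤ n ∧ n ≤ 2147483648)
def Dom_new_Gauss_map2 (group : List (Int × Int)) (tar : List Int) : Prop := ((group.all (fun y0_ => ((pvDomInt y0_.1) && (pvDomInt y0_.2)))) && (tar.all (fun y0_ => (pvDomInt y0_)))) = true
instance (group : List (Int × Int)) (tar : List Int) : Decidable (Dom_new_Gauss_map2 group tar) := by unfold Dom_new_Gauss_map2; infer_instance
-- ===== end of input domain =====

-- B rebuilds the result as explicit "runs" (cut where group[i][1] < group[i+1][0]) and emits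
-- filtered-inner / boundary / reversed-inner per run, instead of A's interleaved index loop
-- with three accumulators; objective: simpler decomposition, same cost.

-- ===== PORT A =====
-- one loop step of A's for-loop (state = (list, deletate_light, dl_list))
def pvStepA (group : List (Int × Int)) (tar : List Int)
    (s : List (Int × Int) × List Int × List (Int × Int)) (index : Int) :
    List (Int × Int) × List Int × List (Int × Int) :=
  let g := PySem.List.pyGetD group index (0, 0)
  if index = (group.length : Int) - 1 ∨ g.2 < (PySem.List.pyGetD group (index + 1) (0, 0)).1 then
    (s.1 ++ [g] ++ s.2.2.reverse, [], [])
  else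
    if g.2 ∈ tar then (s.1, s.2.1 ++ [g.2], s.2.2 ++ [g])
    else (s.1 ++ [g], s.2.1 ++ [g.2], s.2.2 ++ [g])

def new_Gauss_map2 (group : List (Int × Int)) (tar : List Int) : List (Int × Int) :=
  ((PySem.List.pyRange 0 (group.length : Int) 1).foldl (pvStepA group tar) ([], [], [])).1

-- ===== PORT B =====
-- B's first loop: split into runs, state = (runs, cur), iterating over zip(group, group[1:]+[None])
def pvRuns (group : List (Int × Int)) : List (List (Int × Int)) :=
  ((group.zip ((group.drop 1).map some ++ [none])).foldl
    (fun (s : List (List (Int × Int)) × List (Int × Int)) p =>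
      let cur := s.2 ++ [p.1]
      cond (match p.2 with | none => true | some nxt => decide (p.1.2 < nxt.1))
        (s.1 ++ [cur], []) (s.1, cur))
    ([], [])).1

def new_Gauss_map2_alt (group : List (Int × Int)) (tar : List Int) : List (Int × Int) :=
  let inlight := tar
  (pvRuns group).foldl
    (fun out run =>
      let inner := run.dropLast
      out ++ inner.filter (fun x => !(inlight.contains x.2)) ++
        [PySem.List.pyGetD run (-1) (0, 0)] ++ inner.reverse)
    []

-- ===== PRECONDITION & SPEC =====
def Spec_new_Gauss_map2 (group : List (Int × Int)) (tar : List Int) (out : List (Int × Int)) : Prop := out = new_Gauss_map2_alt group tar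
instance (group : List (Int × Int)) (tar : List Int) (out : List (Int × Int)) : Decidable (Spec_new_Gauss_map2 group tar out) := by unfold Spec_new_Gauss_map2; infer_instance

-- ===== CLAIM (what is proved, stated in full; the proofs are below) =====
def Claim_equal_new_Gauss_map2 : Prop := ∀ (group : List (Int × Int)) (tar : List Int), Dom_new_Gauss_map2 group tar → Spec_new_Gauss_map2 group tar (new_Gauss_map2 group tar)

-- ===== LEMMAS AND PROOFS =====

-- A's loop as structural recursion over the remaining suffix of group
def pvRunA (tar : List Int) :
    (List (Int × Int) × List Int × List (Int × Int)) → List (Int × Int) →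
    (List (Int × Int) × List Int × List (Int × Int))
  | s, [] => s
  | s, [x] => (s.1 ++ [x] ++ s.2.2.reverse, [], [])
  | s, x :: y :: rest =>
    if x.2 < y.1 then pvRunA tar (s.1 ++ [x] ++ s.2.2.reverse, [], []) (y :: rest)
    else if x.2 ∈ tar then pvRunA tar (s.1, s.2.1 ++ [x.2], s.2.2 ++ [x]) (y :: rest)
    else pvRunA tar (s.1 ++ [x], s.2.1 ++ [x.2], s.2.2 ++ [x]) (y :: rest)

-- the output part of A's loop, with the accumulated list factored out
def pvOutB (tar : List Int) (dl : List (Int × Int)) : List (Int × Int) → List (Int × Int)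
  | [] => []
  | [x] => x :: dl.reverse
  | x :: y :: rest =>
    if x.2 < y.1 then x :: (dl.reverse ++ pvOutB tar [] (y :: rest))
    else (if x.2 ∈ tar then [] else [x]) ++ pvOutB tar (dl ++ [x]) (y :: rest)

-- recursive characterisation of pvRuns
def pvRunsRec : List (Int × Int) → List (List (Int × Int))
  | [] => []
  | [x] => [[x]]
  | x :: y :: rest =>
    if x.2 < y.1 then [x] :: pvRunsRec (y :: rest)
    else match pvRunsRec (y :: rest) with
      | [] => [[x]]
      | r :: rs => (x :: r) :: rs

-- what B emits for one run
def pvEmit (tar : List Int) (run : List (Int × Int)) : List (Int × Int) :=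
  run.dropLast.filter (fun x => !(tar.contains x.2)) ++
    [PySem.List.pyGetD run (-1) (0, 0)] ++ run.dropLast.reverse

theorem pvBridgeA (group : List (Int × Int)) (tar : List Int) :
    ∀ (d : List (Int × Int)) (i : ℕ) (s), group.drop i = d →
      (PySem.List.pyRange (i : Int) (group.length : Int) 1).foldl (pvStepA group tar) s
        = pvRunA tar s d := by
  intro d
  induction d with
  | nil =>
    intro i s h
    have hlen := congrArg List.length h
    simp at hlen
    rw [PySem.List.pyRange_one_eq_nil (by omega)]
    simp [pvRunA]
  | cons x rest ih =>
    intro i s h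
    have hlen := congrArg List.length h
    simp at hlen
    have hi : i < group.length := by omega
    have hx : group[i]? = some x := by
      have h0 : (group.drop i)[0]? = some x := by rw [h]; rfl
      simpa using h0
    have hgx : PySem.List.pyGetD group (i : Int) (0, 0) = x := by
      rw [PySem.List.pyGetD_natCast]
      simp [List.getD_eq_getElem?_getD, hx]
    have hdropsucc : group.drop (i + 1) = rest := by
      have h1 := congrArg (List.drop 1) h
      rw [List.drop_drop] at h1
      simpa [Nat.add_comm] using h1
    have hcast : ((i : Int) + 1) = (((i + 1 : ℕ)) : Int) := by push_cast; ring
    rw [PySem.List.pyRange_one_cons (by exact_mod_cast hi)]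
    rw [List.foldl_cons]
    cases rest with
    | nil =>
      simp only [List.length_nil] at hlen
      have hcond : (i : Int) = (group.length : Int) - 1 := by omega
      have hstep : pvStepA group tar s (i : Int) = (s.1 ++ [x] ++ s.2.2.reverse, [], []) := by
        simp only [pvStepA, hgx]
        rw [if_pos (Or.inl hcond)]
      rw [hstep]
      have hnil : PySem.List.pyRange ((i : Int) + 1) (group.length : Int) 1 = [] :=
        PySem.List.pyRange_one_eq_nil (by omega)
      rw [hnil]
      simp [pvRunA]
    | cons y rest' =>
      simp only [List.length_cons] at hlen
      have hy : group[i + 1]? = some y := by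
        have h0 : (group.drop (i + 1))[0]? = some y := by rw [hdropsucc]; rfl
        simpa using h0
      have hgy : PySem.List.pyGetD group ((i : Int) + 1) (0, 0) = y := by
        rw [hcast, PySem.List.pyGetD_natCast]
        simp [List.getD_eq_getElem?_getD, hy]
      have hne : ¬ ((i : Int) = (group.length : Int) - 1) := by omega
      rw [hcast]
      by_cases hlt : x.2 < y.1
      · have hstep : pvStepA group tar s (i : Int) = (s.1 ++ [x] ++ s.2.2.reverse, [], []) := by
          simp [pvStepA, hgx, hgy, hne, hlt]
        rw [hstep, ih (i + 1) _ hdropsucc]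
        simp [pvRunA, hlt]
      · by_cases hm : x.2 ∈ tar
        · have hstep : pvStepA group tar s (i : Int) = (s.1, s.2.1 ++ [x.2], s.2.2 ++ [x]) := by
            simp [pvStepA, hgx, hgy, hne, hlt, hm]
          rw [hstep, ih (i + 1) _ hdropsucc]
          simp [pvRunA, hlt, hm]
        · have hstep : pvStepA group tar s (i : Int) = (s.1 ++ [x], s.2.1 ++ [x.2], s.2.2 ++ [x]) := by
            simp [pvStepA, hgx, hgy, hne, hlt, hm]
          rw [hstep, ih (i + 1) _ hdropsucc]
          simp [pvRunA, hlt, hm]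

theorem pvRunA_fst (tar : List Int) :
    ∀ (g : List (Int × Int)) s, (pvRunA tar s g).1 = s.1 ++ pvOutB tar s.2.2 g := by
  intro g
  induction g with
  | nil => intro s; simp [pvRunA, pvOutB]
  | cons x xs ih =>
    intro s
    cases xs with
    | nil => simp [pvRunA, pvOutB]
    | cons y rest =>
      simp only [pvRunA, pvOutB]
      split_ifs with h1 h2 <;> rw [ih] <;> simp

theorem pvRunsRec_ne_nil (g : List (Int × Int)) (h : g ≠ []) : pvRunsRec g ≠ [] := by
  cases g with
  | nil => exact absurd rfl h
  | cons x xs =>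
    cases xs with
    | nil => simp [pvRunsRec]
    | cons y rest =>
      simp only [pvRunsRec]
      split_ifs
      · simp
      · cases hr : pvRunsRec (y :: rest) <;> simp

theorem pvRunsRec_head_ne_nil (g : List (Int × Int)) (r : List (Int × Int))
    (rs : List (List (Int × Int))) (h : pvRunsRec g = r :: rs) : r ≠ [] := by
  cases g with
  | nil => simp [pvRunsRec] at h
  | cons x xs =>
    cases xs with
    | nil =>
      simp [pvRunsRec] at h
      simp [← h.1]
    | cons y rest =>
      simp only [pvRunsRec] at h
      split_ifs at h
      · cases h; simp
      · cases hr : pvRunsRec (y :: rest) with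
        | nil => rw [hr] at h; cases h; simp
        | cons r' rs' => rw [hr] at h; cases h; simp

theorem pvRunsFold :
    ∀ (g : List (Int × Int)), g ≠ [] → ∀ (runs0 : List (List (Int × Int))) (cur : List (Int × Int)),
      ((g.zip ((g.drop 1).map some ++ [none])).foldl
        (fun (s : List (List (Int × Int)) × List (Int × Int)) p =>
          cond (match p.2 with | none => true | some nxt => decide (p.1.2 < nxt.1))
            (s.1 ++ [s.2 ++ [p.1]], []) (s.1, s.2 ++ [p.1]))
        (runs0, cur)).1
      = runs0 ++ (match pvRunsRec g with | [] => [] | r :: rs => (cur ++ r) :: rs) := by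
  intro g
  induction g with
  | nil => intro h; exact absurd rfl h
  | cons x xs ih =>
    intro _ runs0 cur
    cases xs with
    | nil => simp [pvRunsRec]
    | cons y rest =>
      have hxs : (y :: rest) ≠ [] := by simp
      obtain ⟨r, rs, hr⟩ : ∃ r rs, pvRunsRec (y :: rest) = r :: rs := by
        cases hq : pvRunsRec (y :: rest) with
        | nil => exact absurd hq (pvRunsRec_ne_nil _ hxs)
        | cons a b => exact ⟨a, b, rfl⟩
      simp only [List.drop_one, List.tail_cons, List.map_cons, List.cons_append,
        List.zip_cons_cons, List.foldl_cons]
      simp only [List.drop_one, List.tail_cons] at ih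
      by_cases hlt : x.2 < y.1
      · simp only [hlt, decide_true, cond_true]
        rw [ih hxs]
        simp [pvRunsRec, hlt, hr]
      · simp only [hlt, decide_false, cond_false]
        rw [ih hxs]
        simp [pvRunsRec, hlt, hr]

theorem pvRuns_eq_rec (g : List (Int × Int)) : pvRuns g = pvRunsRec g := by
  cases g with
  | nil => rfl
  | cons x xs =>
    obtain ⟨r, rs, hr⟩ : ∃ r rs, pvRunsRec (x :: xs) = r :: rs := by
      cases hq : pvRunsRec (x :: xs) with
      | nil => exact absurd hq (pvRunsRec_ne_nil _ (by simp))
      | cons a b => exact ⟨a, b, rfl⟩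
    have h := pvRunsFold (x :: xs) (by simp) [] []
    rw [hr] at h
    simp only [List.nil_append] at h
    rw [hr]
    exact h

theorem pvOutB_runs (tar : List Int) :
    ∀ (g : List (Int × Int)) r rs, pvRunsRec g = r :: rs → ∀ dl,
      pvOutB tar dl g
        = r.dropLast.filter (fun x => !(tar.contains x.2)) ++
            PySem.List.pyGetD r (-1) (0, 0) :: ((dl ++ r.dropLast).reverse ++ rs.flatMap (pvEmit tar)) := by
  intro g
  induction g with
  | nil => intro r rs h; simp [pvRunsRec] at h
  | cons x xs ih =>
    intro r rs h dl
    cases xs with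
    | nil =>
      simp [pvRunsRec] at h
      obtain ⟨h1, h2⟩ := h
      subst h2
      have hg := PySem.List.pyGetD_neg_one [x] ((0 : Int), (0 : Int)) (by simp)
      simp [pvOutB, ← h1, hg]
    | cons y rest =>
      have hxs : (y :: rest) ≠ [] := by simp
      obtain ⟨r', rs', hr'⟩ : ∃ a b, pvRunsRec (y :: rest) = a :: b := by
        cases hq : pvRunsRec (y :: rest) with
        | nil => exact absurd hq (pvRunsRec_ne_nil _ hxs)
        | cons a b => exact ⟨a, b, rfl⟩
      have hr'ne : r' ≠ [] := pvRunsRec_head_ne_nil _ _ _ hr'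
      simp only [pvRunsRec, hr'] at h
      by_cases hlt : x.2 < y.1
      · rw [if_pos hlt] at h
        cases h
        simp only [pvOutB, if_pos hlt]
        rw [ih _ _ hr' []]
        simp [pvEmit, PySem.List.pyGetD_neg_one, hr'ne]
      · rw [if_neg hlt] at h
        cases h
        simp only [pvOutB, if_neg hlt]
        rw [ih _ _ hr' (dl ++ [x])]
        have hdrop : (x :: r').dropLast = x :: r'.dropLast := by
          cases r' with
          | nil => exact absurd rfl hr'ne
          | cons a b => simp
        have hlast : PySem.List.pyGetD (x :: r') (-1) (0, 0) = PySem.List.pyGetD r' (-1) (0, 0) := by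
          have ha := PySem.List.pyGetD_neg_one (x :: r') ((0 : Int), (0 : Int)) (by simp)
          have hb := PySem.List.pyGetD_neg_one r' ((0 : Int), (0 : Int)) hr'ne
          rw [ha, hb]
          exact List.getLast_cons hr'ne
        rw [hdrop, hlast]
        by_cases hm : x.2 ∈ tar
        · simp [hm]
        · simp [hm]

theorem pvAlt_eq (group : List (Int × Int)) (tar : List Int) :
    new_Gauss_map2_alt group tar = (pvRunsRec group).flatMap (pvEmit tar) := by
  rw [new_Gauss_map2_alt, ← pvRuns_eq_rec]
  have hgen : ∀ (rs : List (List (Int × Int))) (acc : List (Int × Int)),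
      rs.foldl (fun out run =>
        out ++ run.dropLast.filter (fun x => !(tar.contains x.2)) ++
          [PySem.List.pyGetD run (-1) (0, 0)] ++ run.dropLast.reverse) acc
      = acc ++ rs.flatMap (pvEmit tar) := by
    intro rs
    induction rs with
    | nil => intro acc; simp
    | cons a b ihh => intro acc; rw [List.foldl_cons, ihh]; simp [pvEmit]
  exact hgen _ []

-- ===== VERDICT (by name: the statement is the Claim_ definition above) =====
theorem new_Gauss_map2_spec : Claim_equal_new_Gauss_map2 := by
  intro group tar _
  unfold Spec_new_Gauss_map2
  have hA : new_Gauss_map2 group tar = pvOutB tar [] group := by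
    rw [new_Gauss_map2]
    have h := pvBridgeA group tar group 0 ([], [], []) (by simp)
    simp only [Nat.cast_zero] at h
    rw [h, pvRunA_fst]
    simp
  rw [hA, pvAlt_eq]
  cases g : group with
  | nil => simp [pvOutB, pvRunsRec]
  | cons x xs =>
    obtain ⟨r, rs, hr⟩ : ∃ a b, pvRunsRec (x :: xs) = a :: b := by
      cases hq : pvRunsRec (x :: xs) with
      | nil => exact absurd hq (pvRunsRec_ne_nil _ (by simp))
      | cons a b => exact ⟨a, b, rfl⟩
    rw [pvOutB_runs tar _ _ _ hr [], hr]
    simp [pvEmit]
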